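-- pv_equiv track=rewrite | github.com/hrakaroo/chess-openings | bin/merge.py | merge_transitions
-- ===== SOURCE A (Python) =====
-- def merge_transitions(all_transitions_list):
--     """
--     Merge transitions from multiple files.
--
--     Args:
--         all_transitions_list: List of transitions dicts from different files
--
--     Returns:
--         dict: Merged transitions with combined annotations
--     """
--     merged = {}
--
--     for transitions in all_transitions_list:
--         for key, annotation in transitions.items():
--             if key in merged:
--                 # Transition already exists - merge annotations
--                 existing_annotation = merged[key]
--
--                 # Combine annotations if both exist and are different
--                 if annotation and existing_annotation:
--                     if annotation not in existing_annotation: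
--                         merged[key] = existing_annotation + ' | ' + annotation
--                 elif annotation:
--                     # Only new annotation exists
--                     merged[key] = annotation
--                 # else: keep existing annotation
--             else:
--                 # New transition
--                 merged[key] = annotation
--
--     return merged
-- ===== SOURCE B (Python) =====
-- def combine(existing, annotation):
--     """Fold one annotation into an already-merged annotation (same rules as A's inline branches)."""
--     if annotation and existing:
--         return existing if annotation in existing else existing + ' | ' + annotation
--     return annotation if annotation else existing
--
--
-- def merge_transitions(all_transitions_list):
--     # First pass: group every annotation under its key, in encounter order
--     # (key order = first-seen order, like A's merged dict).
--     groups = {}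
--     for transitions in all_transitions_list:
--         for key, annotation in transitions.items():
--             if key in groups:
--                 groups[key].append(annotation)
--             else:
--                 groups[key] = [annotation]
--
--     # Second pass: reduce each key's annotation list, seeded by its first
--     # annotation taken verbatim.
--     merged = {}
--     for key, annotations in groups.items():
--         result = annotations[0]
--         for annotation in annotations[1:]:
--             result = combine(result, annotation)
--         merged[key] = result
--     return merged
-- ===== Notes on version B (the rewrite author's own statement) =====
-- stated objective: alternative
-- what changed: B splits A's single interleaved merge loop into two passes: it first builds a grouping dict key -> list of annotations in encounter order, then reduces each key's list with a combine(existing, annotation) helper seeded by the first annotation; A instead updates the merged dict in place with inline branches.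
import Mathlib
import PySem

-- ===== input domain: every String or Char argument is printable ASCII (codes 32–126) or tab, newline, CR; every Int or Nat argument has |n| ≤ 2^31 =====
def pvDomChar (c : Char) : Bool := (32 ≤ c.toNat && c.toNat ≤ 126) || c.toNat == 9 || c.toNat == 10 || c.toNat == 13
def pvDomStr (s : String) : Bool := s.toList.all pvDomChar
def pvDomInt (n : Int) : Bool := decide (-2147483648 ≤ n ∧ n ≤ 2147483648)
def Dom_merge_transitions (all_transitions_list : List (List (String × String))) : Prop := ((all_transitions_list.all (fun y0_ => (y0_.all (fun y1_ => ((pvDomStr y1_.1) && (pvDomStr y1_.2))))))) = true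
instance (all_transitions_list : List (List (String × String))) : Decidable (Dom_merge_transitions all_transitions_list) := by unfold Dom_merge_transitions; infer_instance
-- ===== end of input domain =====

-- B restates A's single interleaved merge loop as two passes (group annotations per key, then reduce each group with a combine helper); same results, no speed claim.


-- ===== PORT A =====
-- literal transliteration of A: one dict `merged`, updated in place with A's inline branches;
-- each inner list is read as the Python dict it denotes via PySem.Dict.ofList, iterated by .items
def merge_transitions (all_transitions_list : List (List (String × String))) : List (String × String) :=
  (all_transitions_list.foldl (fun merged transitions =>
      (PySem.Dict.ofList transitions).items.foldl (fun merged kv =>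
        if merged.contains kv.1 then
          -- existing_annotation = merged[key] (present: contains is true)
          let existing := merged.getD kv.1 ""
          if kv.2 ≠ "" ∧ existing ≠ "" then
            if PySem.Str.isIn kv.2 existing then merged
            else merged.insert kv.1 (existing ++ " | " ++ kv.2)
          else if kv.2 ≠ "" then merged.insert kv.1 kv.2
          else merged
        else merged.insert kv.1 kv.2) merged)
    PySem.Dict.empty).items

-- ===== PORT B =====
-- B-side helper: Source B's `combine`
def pvCombine (existing annotation : String) : String :=
  if annotation ≠ "" ∧ existing ≠ "" then
    if PySem.Str.isIn annotation existing then existing else existing ++ " | " ++ annotation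
  else if annotation ≠ "" then annotation else existing

-- B-side helper: Source B's inner reduction (result = annotations[0]; fold combine over annotations[1:])
def pvReduce (annotations : List String) : String :=
  match annotations with
  | [] => ""            -- unreachable in B: every group holds at least one annotation
  | h :: t => t.foldl pvCombine h

-- literal transliteration of Source B: group annotations per key, then reduce each group
def merge_transitions_alt (all_transitions_list : List (List (String × String))) : List (String × String) :=
  let groups := all_transitions_list.foldl (fun groups transitions =>
      (PySem.Dict.ofList transitions).items.foldl (fun groups kv =>
        if groups.contains kv.1 then groups.insert kv.1 (groups.getD kv.1 [] ++ [kv.2])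
        else groups.insert kv.1 [kv.2]) groups)
    (PySem.Dict.empty : PySem.Dict String (List String))
  (groups.items.foldl (fun merged kg => merged.insert kg.1 (pvReduce kg.2)) PySem.Dict.empty).items

-- ===== PRECONDITION & SPEC =====
def Spec_merge_transitions (all_transitions_list : List (List (String × String))) (out : List (String × String)) : Prop := out = merge_transitions_alt all_transitions_list
instance (all_transitions_list : List (List (String × String))) (out : List (String × String)) : Decidable (Spec_merge_transitions all_transitions_list out) := by unfold Spec_merge_transitions; infer_instance

-- ===== CLAIM (what is proved, stated in full; the proofs are below) =====
def Claim_equal_merge_transitions : Prop := ∀ (all_transitions_list : List (List (String × String))), Dom_merge_transitions all_transitions_list → Spec_merge_transitions all_transitions_list (merge_transitions all_transitions_list)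

-- ===== LEMMAS AND PROOFS =====

-- A's per-pair step (the inner lambda of port A), named for the proofs
def pvStepA (merged : PySem.Dict String String) (kv : String × String) : PySem.Dict String String :=
  if merged.contains kv.1 then
    let existing := merged.getD kv.1 ""
    if kv.2 ≠ "" ∧ existing ≠ "" then
      if PySem.Str.isIn kv.2 existing then merged
      else merged.insert kv.1 (existing ++ " | " ++ kv.2)
    else if kv.2 ≠ "" then merged.insert kv.1 kv.2
    else merged
  else merged.insert kv.1 kv.2

-- B's per-pair grouping step (the inner lambda of port B's first pass), named for the proofs
def pvStepG (groups : PySem.Dict String (List String)) (kv : String × String) : PySem.Dict String (List String) :=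
  if groups.contains kv.1 then groups.insert kv.1 (groups.getD kv.1 [] ++ [kv.2])
  else groups.insert kv.1 [kv.2]

-- reduce each group's value: the dict A maintains is exactly this image of B's grouping dict
def pvDmv (g : PySem.Dict String (List String)) : PySem.Dict String String :=
  PySem.Dict.mk (g.items.map (fun p => (p.1, pvReduce p.2)))

lemma pvCombine_empty (a : String) : pvCombine "" a = a := by
  unfold pvCombine
  rcases eq_or_ne a "" with h | h <;> simp [h]

lemma pvReduce_append (l : List String) (a : String) :
    pvReduce (l ++ [a]) = pvCombine (pvReduce l) a := by
  cases l with
  | nil => simp [pvReduce, pvCombine_empty]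
  | cons h t => simp [pvReduce, List.foldl_append]

lemma pvFind_unique {β : Type} (L : List (String × β)) (k : String) (pr : String × β)
    (hnd : (L.map Prod.fst).Nodup) (h : L.find? (fun p => p.1 == k) = some pr) :
    ∀ p ∈ L, p.1 = k → p = pr := by
  induction L with
  | nil => simp at h
  | cons hd tl ih =>
    simp only [List.map_cons, List.nodup_cons] at hnd
    by_cases hhd : hd.1 = k
    · rw [List.find?_cons_of_pos (by simpa using hhd)] at h
      cases h
      intro p hp hpk
      rcases List.mem_cons.mp hp with hp | hp
      · exact hp
      · exact absurd (by rw [hhd, ← hpk]; exact List.mem_map_of_mem hp) hnd.1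
    · rw [List.find?_cons_of_neg (by simpa using hhd)] at h
      intro p hp hpk
      rcases List.mem_cons.mp hp with hp | hp
      · exact absurd (hp ▸ hpk) hhd
      · exact ih hnd.2 h p hp hpk

lemma contains_pvDmv (g : PySem.Dict String (List String)) (k : String) :
    (pvDmv g).contains k = g.contains k := by
  simp [pvDmv, PySem.Dict.contains, List.any_map, Function.comp_def]

-- the key commutation: A's step on the reduced dict is the reduction of B's grouping step
lemma pvStep_comm (g : PySem.Dict String (List String)) (kv : String × String)
    (hnd : g.keys.Nodup) : pvStepA (pvDmv g) kv = pvDmv (pvStepG g kv) := by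
  obtain ⟨k, a⟩ := kv
  by_cases hc : g.contains k = true
  · -- key already grouped
    have hcd : (pvDmv g).contains k = true := by rw [contains_pvDmv]; exact hc
    -- the (unique) entry for k
    have hfind : ∃ l0, g.items.find? (fun p => p.1 == k) = some (k, l0) := by
      have hex : ∃ p ∈ g.items, (p.1 == k) = true := by
        unfold PySem.Dict.contains at hc; exact List.any_eq_true.mp hc
      have hs : (g.items.find? (fun p => p.1 == k)).isSome = true :=
        List.find?_isSome.mpr hex
      rcases Option.isSome_iff_exists.mp hs with ⟨pr, hpr⟩
      have hk : pr.1 = k := by simpa using List.find?_some hpr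
      exact ⟨pr.2, by rw [hpr]; cases pr; simp_all⟩
    rcases hfind with ⟨l0, hfind⟩
    have hgetg : g.getD k [] = l0 := by
      simp [PySem.Dict.getD, PySem.Dict.get?, hfind]
    have hfindd : (pvDmv g).items.find? (fun p => p.1 == k) = some (k, pvReduce l0) := by
      simp only [pvDmv]
      rw [List.find?_map]
      have : ((fun p => p.1 == k) ∘ fun (p : String × List String) => (p.1, pvReduce p.2))
          = (fun p => p.1 == k) := rfl
      rw [this, hfind]
      rfl
    have hgetd : (pvDmv g).getD k "" = pvReduce l0 := by
      simp [PySem.Dict.getD, PySem.Dict.get?, hfindd]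
    have huniq := pvFind_unique g.items k (k, l0) hnd hfind
    -- inserting v at k rewrites every entry at key k (there is exactly one) to (k, v)
    have hmapped : ∀ (v : String),
        (pvDmv g).insert k v = PySem.Dict.mk (g.items.map
          (fun p => if p.1 = k then (k, v) else (p.1, pvReduce p.2))) := by
      intro v
      simp only [PySem.Dict.insert, hcd, if_true]
      simp only [pvDmv, List.map_map]
      congr 1
      apply List.map_congr_left
      intro p _
      by_cases hpk : p.1 = k <;> simp [hpk]
    -- leaving the dict unchanged is also such a rewrite, with the entry's own value
    have hid : pvDmv g = PySem.Dict.mk (g.items.map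
        (fun p => if p.1 = k then (k, pvReduce l0) else (p.1, pvReduce p.2))) := by
      simp only [pvDmv]
      congr 1
      apply List.map_congr_left
      intro p hp
      by_cases hpk : p.1 = k
      · have := huniq p hp hpk; subst this; simp
      · simp [hpk]
    have hrhs : pvDmv (pvStepG g (k, a)) = PySem.Dict.mk (g.items.map
        (fun p => if p.1 = k then (k, pvCombine (pvReduce l0) a) else (p.1, pvReduce p.2))) := by
      simp only [pvStepG, hc, if_true, hgetg]
      simp only [PySem.Dict.insert, hc, if_true, pvDmv, List.map_map]
      congr 1
      apply List.map_congr_left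
      intro p hp
      by_cases hpk : p.1 = k
      · have := huniq p hp hpk
        subst this
        simp [pvReduce_append]
      · simp [hpk]
    rw [hrhs]
    simp only [pvStepA, hcd, if_true, hgetd]
    split_ifs with h1 h2 h3
    · -- both nonempty, annotation already a substring: keep existing
      have : pvCombine (pvReduce l0) a = pvReduce l0 := by
        unfold pvCombine; rw [if_pos h1, if_pos h2]
      rw [this]; exact hid
    · -- both nonempty, not a substring: append with separator
      have : pvCombine (pvReduce l0) a = pvReduce l0 ++ " | " ++ a := by
        unfold pvCombine; rw [if_pos h1, if_neg h2]
      rw [this]; exact hmapped _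
    · -- existing empty, annotation nonempty: take annotation
      have : pvCombine (pvReduce l0) a = a := by
        unfold pvCombine; rw [if_neg h1, if_pos h3]
      rw [this]; exact hmapped _
    · -- annotation empty: keep existing
      have : pvCombine (pvReduce l0) a = pvReduce l0 := by
        unfold pvCombine; rw [if_neg h1, if_neg h3]
      rw [this]; exact hid
  · -- new key: both append
    have hcf : g.contains k = false := by simpa using hc
    have hcd : (pvDmv g).contains k = false := by rw [contains_pvDmv]; exact hcf
    simp only [pvStepA, pvStepG, hcd, hcf, Bool.false_eq_true, if_false]
    simp only [PySem.Dict.insert, hcd, hcf, Bool.false_eq_true, if_false]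
    simp [pvDmv, pvReduce]

lemma pvStepG_nodup (g : PySem.Dict String (List String)) (kv : String × String)
    (hnd : g.keys.Nodup) : (pvStepG g kv).keys.Nodup := by
  unfold pvStepG
  split_ifs <;> exact PySem.Dict.nodup_keys_insert _ _ _ hnd

lemma pvInner_comm (ps : List (String × String)) :
    ∀ g : PySem.Dict String (List String), g.keys.Nodup →
      ps.foldl pvStepA (pvDmv g) = pvDmv (ps.foldl pvStepG g) ∧
      (ps.foldl pvStepG g).keys.Nodup := by
  induction ps with
  | nil => intro g hnd; exact ⟨rfl, hnd⟩
  | cons kv t ih =>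
    intro g hnd
    have h1 := pvStep_comm g kv hnd
    have h2 := pvStepG_nodup g kv hnd
    simpa [List.foldl_cons, h1] using ih (pvStepG g kv) h2

lemma pvOuter_comm (l : List (List (String × String))) :
    ∀ g : PySem.Dict String (List String), g.keys.Nodup →
      l.foldl (fun d ts => (PySem.Dict.ofList ts).items.foldl pvStepA d) (pvDmv g)
        = pvDmv (l.foldl (fun d ts => (PySem.Dict.ofList ts).items.foldl pvStepG d) g) ∧
      (l.foldl (fun d ts => (PySem.Dict.ofList ts).items.foldl pvStepG d) g).keys.Nodup := by
  induction l with
  | nil => intro g hnd; exact ⟨rfl, hnd⟩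
  | cons ts t ih =>
    intro g hnd
    obtain ⟨h1, h2⟩ := pvInner_comm (PySem.Dict.ofList ts).items g hnd
    simpa [List.foldl_cons, h1] using ih _ h2

lemma pvSecondPass (L : List (String × List String)) :
    ∀ d : PySem.Dict String String,
      (∀ p ∈ L, d.contains p.1 = false) → (L.map Prod.fst).Nodup →
      (L.foldl (fun merged kg => merged.insert kg.1 (pvReduce kg.2)) d).items
        = d.items ++ L.map (fun p => (p.1, pvReduce p.2)) := by
  induction L with
  | nil => intro d _ _; simp
  | cons hd tl ih =>
    intro d hfree hnd
    simp only [List.map_cons, List.nodup_cons] at hnd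
    have hc : d.contains hd.1 = false := hfree hd (List.mem_cons_self)
    have hins : d.insert hd.1 (pvReduce hd.2) = PySem.Dict.mk (d.items ++ [(hd.1, pvReduce hd.2)]) := by
      simp [PySem.Dict.insert, hc]
    have hfree' : ∀ p ∈ tl, (d.insert hd.1 (pvReduce hd.2)).contains p.1 = false := by
      intro p hp
      rw [hins]
      have hne : hd.1 ≠ p.1 := fun h => hnd.1 (h ▸ List.mem_map_of_mem hp)
      have hdp : d.contains p.1 = false := hfree p (List.mem_cons_of_mem _ hp)
      simp only [PySem.Dict.contains] at hdp ⊢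
      simp [List.any_append, hdp, hne]
    rw [List.foldl_cons, ih _ hfree' hnd.2, hins]
    simp

-- ===== VERDICT (by name: the statement is the Claim_ definition above) =====
theorem merge_transitions_spec : Claim_equal_merge_transitions := by
  intro l _
  unfold Spec_merge_transitions merge_transitions merge_transitions_alt
  have hempty : (PySem.Dict.empty : PySem.Dict String String) = pvDmv PySem.Dict.empty := rfl
  have hnd0 : (PySem.Dict.empty : PySem.Dict String (List String)).keys.Nodup :=
    PySem.Dict.nodup_keys_empty
  obtain ⟨h1, h2⟩ := pvOuter_comm l PySem.Dict.empty hnd0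
  show (l.foldl (fun d ts => (PySem.Dict.ofList ts).items.foldl pvStepA d) PySem.Dict.empty).items = _
  rw [hempty, h1]
  set g := l.foldl (fun d ts => (PySem.Dict.ofList ts).items.foldl pvStepG d) PySem.Dict.empty with hg
  show (pvDmv g).items = (g.items.foldl (fun merged kg => merged.insert kg.1 (pvReduce kg.2)) PySem.Dict.empty).items
  rw [pvSecondPass g.items PySem.Dict.empty (fun p _ => by simp [PySem.Dict.contains, PySem.Dict.empty]) h2]
  simp [pvDmv, PySem.Dict.empty]
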